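-- pv_equiv track=rewrite | github.com/Joseph-Jung/marykay.com-VSCode | search-site/app.py | extract_product_image
-- ===== SOURCE A (Python) =====
-- def extract_product_image(rec: dict) -> dict:
--     """Pick the best product image from a record."""
--     for img in rec.get("images", []):
--         src = img.get("src", "")
--         if "PRD" in src or "hi-res" in src.lower() or "product" in src.lower():
--             return img
--     # Fallback: first non-logo image
--     for img in rec.get("images", []):
--         src = img.get("src", "")
--         alt = img.get("alt", "").lower()
--         if "logo" not in src.lower() and "logo" not in alt and "icon" not in alt:
--             return img
--     return {"src": "", "alt": ""}
-- ===== SOURCE B (Python) =====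
-- def extract_product_image(rec: dict) -> dict:
--     """Pick the best product image from a record (single pass with a latched fallback)."""
--     best_fallback = None
--     for img in rec.get("images", []):
--         src = img.get("src", "")
--         low = src.lower()
--         if "PRD" in src or "hi-res" in low or "product" in low:
--             return img
--         if best_fallback is None:
--             alt = img.get("alt", "").lower()
--             if "logo" not in low and "logo" not in alt and "icon" not in alt:
--                 best_fallback = img
--     if best_fallback is not None:
--         return best_fallback
--     return {"src": "", "alt": ""}
-- ===== Notes on version B (the rewrite author's own statement) =====
-- stated objective: alternative
-- what changed: Replaces A's two sequential scans (primary match, then non-logo fallback) by one pass that returns on a primary match and latches the first eligible fallback while scanning.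
import Mathlib
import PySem

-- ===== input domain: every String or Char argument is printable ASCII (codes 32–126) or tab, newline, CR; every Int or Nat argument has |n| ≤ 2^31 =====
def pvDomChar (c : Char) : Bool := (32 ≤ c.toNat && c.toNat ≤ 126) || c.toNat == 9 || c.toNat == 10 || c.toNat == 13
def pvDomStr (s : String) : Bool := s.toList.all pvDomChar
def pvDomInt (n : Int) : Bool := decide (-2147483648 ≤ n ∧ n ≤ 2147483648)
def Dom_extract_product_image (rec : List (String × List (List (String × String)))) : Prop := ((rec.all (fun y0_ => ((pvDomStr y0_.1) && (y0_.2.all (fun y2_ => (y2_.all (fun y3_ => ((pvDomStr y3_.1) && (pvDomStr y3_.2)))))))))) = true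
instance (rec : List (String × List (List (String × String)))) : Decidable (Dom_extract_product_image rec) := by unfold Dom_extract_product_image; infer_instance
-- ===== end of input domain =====

-- B replaces A's two sequential scans by one pass that returns the first primary
-- match and latches the first eligible fallback while scanning (alternative decomposition).

-- ===== PORT A =====
-- first loop: first image whose src marks it as a primary product image
def epiLoop1 : List (List (String × String)) → Option (List (String × String))
  | [] => none
  | img :: rest =>
    let src := (PySem.Dict.mk img).getD "src" ""
    if PySem.Str.isIn "PRD" src || PySem.Str.isIn "hi-res" (PySem.Str.lower src)
        || PySem.Str.isIn "product" (PySem.Str.lower src) then some img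
    else epiLoop1 rest

-- second loop: first non-logo / non-icon image
def epiLoop2 : List (List (String × String)) → Option (List (String × String))
  | [] => none
  | img :: rest =>
    let src := (PySem.Dict.mk img).getD "src" ""
    let alt := PySem.Str.lower ((PySem.Dict.mk img).getD "alt" "")
    if !(PySem.Str.isIn "logo" (PySem.Str.lower src)) && !(PySem.Str.isIn "logo" alt)
        && !(PySem.Str.isIn "icon" alt) then some img
    else epiLoop2 rest

def extract_product_image (rec : List (String × List (List (String × String)))) : List (String × String) :=
  let images := (PySem.Dict.mk rec).getD "images" []
  match epiLoop1 images with
  | some img => img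
  | none =>
    match epiLoop2 images with
    | some img => img
    | none => [("src", ""), ("alt", "")]

-- ===== PORT B =====
-- single pass: return on a primary match, latch the first eligible fallback in fb
def epiScan : List (List (String × String)) → Option (List (String × String)) → List (String × String)
  | [], fb =>
    match fb with
    | some f => f
    | none => [("src", ""), ("alt", "")]
  | img :: rest, fb =>
    let src := (PySem.Dict.mk img).getD "src" ""
    let low := PySem.Str.lower src
    if PySem.Str.isIn "PRD" src || PySem.Str.isIn "hi-res" low || PySem.Str.isIn "product" low then
      img
    else
      let fb' :=
        match fb with
        | some f => some f
        | none =>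
          let alt := PySem.Str.lower ((PySem.Dict.mk img).getD "alt" "")
          if !(PySem.Str.isIn "logo" low) && !(PySem.Str.isIn "logo" alt)
              && !(PySem.Str.isIn "icon" alt) then some img
          else none
      epiScan rest fb'

def extract_product_image_alt (rec : List (String × List (List (String × String)))) : List (String × String) :=
  epiScan ((PySem.Dict.mk rec).getD "images" []) none

-- ===== PRECONDITION & SPEC =====
def Spec_extract_product_image (rec : List (String × List (List (String × String)))) (out : List (String × String)) : Prop := out = extract_product_image_alt rec
instance (rec : List (String × List (List (String × String)))) (out : List (String × String)) : Decidable (Spec_extract_product_image rec out) := by unfold Spec_extract_product_image; infer_instance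

-- ===== CLAIM (what is proved, stated in full; the proofs are below) =====
def Claim_equal_extract_product_image : Prop := ∀ (rec : List (String × List (List (String × String)))), Dom_extract_product_image rec → Spec_extract_product_image rec (extract_product_image rec)

-- ===== LEMMAS AND PROOFS =====
-- Invariant of B's single pass: it equals 'primary match, else latched fallback,
-- else A's second scan, else the default'.
theorem epiScan_spec (l : List (List (String × String))) :
    ∀ fb : Option (List (String × String)),
      epiScan l fb =
        match epiLoop1 l with
        | some img => img
        | none =>
          match fb with
          | some f => f
          | none =>
            match epiLoop2 l with
            | some img => img
            | none => [("src", ""), ("alt", "")] := by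
  induction l with
  | nil => intro fb; cases fb <;> rfl
  | cons img rest ih =>
    intro fb
    cases fb <;> simp only [epiScan, epiLoop1, epiLoop2] <;> split_ifs <;> simp [ih]

-- ===== VERDICT (by name: the statement is the Claim_ definition above) =====
theorem extract_product_image_spec : Claim_equal_extract_product_image := by
  intro rec _
  unfold Spec_extract_product_image extract_product_image extract_product_image_alt
  rw [epiScan_spec]
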